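-- pv_equiv track=rewrite | github.com/MarcdeFalco/advent-of-code-2021 | day18/s.py | add_right
-- ===== SOURCE A (Python) =====
-- def add_right(s, a):
--     i = 0
--     l = ''
--     while i < len(s):
--         c = s[i]
--         if c.isdigit():
--             n = c
--             while i < len(s)-1 and s[i+1].isdigit():
--                 i += 1
--                 n = n + s[i]
--             return l + str(int(n)+a) + s[i+1:]
--         else:
--             l = l + c
--         i += 1
--     return s
-- ===== SOURCE B (Python) =====
-- def add_right(s, a):
--     i = next((k for k, c in enumerate(s) if c.isdigit()), None)
--     if i is None:
--         return s
--     j = i + 1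
--     while j < len(s) and s[j].isdigit():
--         j += 1
--     return s[:i] + str(int(s[i:j]) + a) + s[j:]
-- ===== Notes on version B (the rewrite author's own statement) =====
-- stated objective: faster
-- what changed: B replaces A's char-by-char scan with quadratic accumulator-string concatenation by a find-first-digit-index, run extension, and a single three-slice splice.
import Mathlib
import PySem

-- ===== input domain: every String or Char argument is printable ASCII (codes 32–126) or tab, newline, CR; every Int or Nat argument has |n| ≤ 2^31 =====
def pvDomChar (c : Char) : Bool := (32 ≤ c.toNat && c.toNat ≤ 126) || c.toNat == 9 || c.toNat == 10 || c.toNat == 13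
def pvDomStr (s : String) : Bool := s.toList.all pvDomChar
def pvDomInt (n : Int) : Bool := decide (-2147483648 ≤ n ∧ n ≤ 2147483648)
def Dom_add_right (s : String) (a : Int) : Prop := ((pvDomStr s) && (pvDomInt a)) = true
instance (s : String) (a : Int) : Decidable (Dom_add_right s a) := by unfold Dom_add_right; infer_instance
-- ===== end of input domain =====

-- B adds `a` to the first digit run by index search + slicing instead of A's
-- accumulator scan; same return value, stated as exact equivalence.
-- (Both while loops are ported with a fuel counter ≥ the remaining length, so the
-- recursion is structural; with that much fuel the guard, not the fuel, stops the loop.)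

-- ===== PORT A =====
-- inner while loop: `while i < len(s)-1 and s[i+1].isdigit(): i += 1; n = n + s[i]`
def addRA_inner (cs : List Char) : Nat → Nat → List Char → Nat × List Char
  | 0, i, n => (i, n)
  | fuel + 1, i, n =>
    if i < cs.length - 1 && PySem.Chars.isdigit (cs.getD (i + 1) ' ') then
      addRA_inner cs fuel (i + 1) (n ++ [cs.getD (i + 1) ' '])
    else (i, n)

-- outer while loop over index i with accumulator l
def addRA_outer (cs : List Char) (a : Int) : Nat → Nat → List Char → List Char
  | 0, _, _ => cs
  | fuel + 1, i, l =>
    if PySem.Chars.isdigit (cs.getD i ' ') then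
      let p := addRA_inner cs cs.length i [cs.getD i ' ']
      -- `return l + str(int(n)+a) + s[i+1:]`; int(n) never raises (n is a nonempty digit run)
      l ++ PySem.Int.toChars ((PySem.Int.ofChars? p.2).getD 0 + a) ++ cs.drop (p.1 + 1)
    else addRA_outer cs a fuel (i + 1) (l ++ [cs.getD i ' '])

def add_right (s : String) (a : Int) : String :=
  String.ofList (addRA_outer s.toList a s.toList.length 0 [])

-- ===== PORT B =====
-- `while j < len(s) and s[j].isdigit(): j += 1`
def addRB_ext (cs : List Char) : Nat → Nat → Nat
  | 0, j => j
  | fuel + 1, j =>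
    if j < cs.length && PySem.Chars.isdigit (cs.getD j ' ') then addRB_ext cs fuel (j + 1)
    else j

def add_right_alt (s : String) (a : Int) : String :=
  let cs := s.toList
  match cs.findIdx? (fun c => PySem.Chars.isdigit c) with
  | none => s
  | some i =>
    let j := addRB_ext cs cs.length (i + 1)
    -- `s[:i] + str(int(s[i:j]) + a) + s[j:]`
    String.ofList (PySem.List.slice cs none (some (i : Int))
      ++ PySem.Int.toChars
           ((PySem.Int.ofChars? (PySem.List.slice cs (some (i : Int)) (some (j : Int)))).getD 0 + a)
      ++ PySem.List.slice cs (some (j : Int)) none)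

-- ===== PRECONDITION & SPEC =====
def Spec_add_right (s : String) (a : Int) (out : String) : Prop := out = add_right_alt s a
instance (s : String) (a : Int) (out : String) : Decidable (Spec_add_right s a out) := by unfold Spec_add_right; infer_instance

-- ===== CLAIM (what is proved, stated in full; the proofs are below) =====
def Claim_equal_add_right : Prop := ∀ (s : String) (a : Int), Dom_add_right s a → Spec_add_right s a (add_right s a)

-- ===== LEMMAS AND PROOFS =====

lemma addRB_ext_ge (cs : List Char) (fuel j : Nat) : j ≤ addRB_ext cs fuel j := by
  induction fuel generalizing j with
  | zero => simp [addRB_ext]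
  | succ fuel ih =>
    rw [addRB_ext]
    split
    · exact le_trans (Nat.le_succ j) (ih (j + 1))
    · exact le_refl j

lemma addRB_ext_stop (cs : List Char) (fuel j : Nat)
    (h : (j < cs.length && PySem.Chars.isdigit (cs.getD j ' ')) = false) :
    addRB_ext cs fuel j = j := by
  cases fuel with
  | zero => rfl
  | succ fuel => rw [addRB_ext, if_neg (by rw [h]; simp)]

-- once fuel ≥ cs.length - j, more fuel changes nothing
lemma addRB_ext_fuel (cs : List Char) (f₁ f₂ j : Nat) (h₁ : cs.length - j ≤ f₁)
    (h₂ : cs.length - j ≤ f₂) : addRB_ext cs f₁ j = addRB_ext cs f₂ j := by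
  induction f₁ generalizing f₂ j with
  | zero =>
    have hj : ¬ (j < cs.length) := by omega
    cases f₂ with
    | zero => rfl
    | succ f₂ => rw [addRB_ext, addRB_ext, if_neg (by simp [hj])]
  | succ f₁ ih =>
    cases f₂ with
    | zero =>
      have hj : ¬ (j < cs.length) := by omega
      rw [addRB_ext, addRB_ext, if_neg (by simp [hj])]
    | succ f₂ =>
      rw [addRB_ext, addRB_ext]
      split
      · rename_i hc
        simp only [Bool.and_eq_true, decide_eq_true_eq] at hc
        exact ih f₂ (j + 1) (by omega) (by omega)
      · rfl

lemma addRA_inner_eq (cs : List Char) (fuel i : Nat) (n : List Char)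
    (hf : cs.length - (i + 1) ≤ fuel) :
    addRA_inner cs fuel i n
      = (addRB_ext cs cs.length (i + 1) - 1,
         n ++ (cs.drop (i + 1)).take (addRB_ext cs cs.length (i + 1) - (i + 1))) := by
  induction fuel generalizing i n with
  | zero =>
    have h1 : ¬ (i + 1 < cs.length) := by omega
    have he : addRB_ext cs cs.length (i + 1) = i + 1 :=
      addRB_ext_stop cs cs.length (i + 1) (by simp [h1])
    rw [addRA_inner, he]
    simp
  | succ fuel ih =>
    rw [addRA_inner]
    by_cases h1 : i + 1 < cs.length
    · have hget : cs.getD (i + 1) ' ' = cs[i + 1] := List.getD_eq_getElem _ _ h1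
      by_cases h2 : PySem.Chars.isdigit cs[i + 1]
      · rw [if_pos (by rw [hget]; simp only [Bool.and_eq_true, decide_eq_true_eq]; exact ⟨by omega, h2⟩)]
        rw [ih (i + 1) _ (by omega)]
        have he : addRB_ext cs cs.length (i + 1) = addRB_ext cs cs.length (i + 2) := by
          rw [addRB_ext_fuel cs cs.length (cs.length - i) (i + 1) (by omega) (by omega)]
          have hd : cs.length - i = (cs.length - (i + 1)) + 1 := by omega
          rw [hd, addRB_ext,
            if_pos (by rw [hget]; simp only [Bool.and_eq_true, decide_eq_true_eq]; exact ⟨h1, h2⟩),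
            addRB_ext_fuel cs (cs.length - (i + 1)) cs.length (i + 2) (by omega) (by omega)]
        have hge : i + 2 ≤ addRB_ext cs cs.length (i + 2) := addRB_ext_ge cs cs.length (i + 2)
        have hdrop : cs.drop (i + 1) = cs[i + 1] :: cs.drop (i + 2) :=
          List.drop_eq_getElem_cons h1
        rw [he, hdrop, hget]
        have h3 : addRB_ext cs cs.length (i + 2) - (i + 1)
            = (addRB_ext cs cs.length (i + 2) - (i + 2)) + 1 := by omega
        rw [h3, List.take_succ_cons]
        simp
      · have hd : PySem.Chars.isdigit (cs.getD (i + 1) ' ') = false := by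
          rw [hget]; exact Bool.eq_false_iff.mpr h2
        rw [if_neg (by rw [hd]; simp)]
        have he : addRB_ext cs cs.length (i + 1) = i + 1 :=
          addRB_ext_stop cs cs.length (i + 1) (by rw [hd]; simp)
        rw [he]; simp
    · have hc : ¬ (i < cs.length - 1) := by omega
      rw [if_neg (by simp [hc])]
      have he : addRB_ext cs cs.length (i + 1) = i + 1 :=
        addRB_ext_stop cs cs.length (i + 1) (by simp [h1])
      rw [he]; simp

-- the value B computes, on the list side
def altList (cs : List Char) (a : Int) : List Char :=
  match cs.findIdx? (fun c => PySem.Chars.isdigit c) with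
  | none => cs
  | some i =>
    let j := addRB_ext cs cs.length (i + 1)
    cs.take i
      ++ PySem.Int.toChars ((PySem.Int.ofChars? ((cs.drop i).take (j - i))).getD 0 + a)
      ++ cs.drop j

lemma addRA_outer_eq (cs : List Char) (a : Int) (fuel i : Nat) (hf : cs.length - i ≤ fuel)
    (hle : i ≤ cs.length)
    (hnd : ∀ k, (h : k < cs.length) → k < i → PySem.Chars.isdigit cs[k] = false) :
    addRA_outer cs a fuel i (cs.take i) = altList cs a := by
  induction fuel generalizing i with
  | zero =>
    have hi : i = cs.length := by omega
    rw [addRA_outer]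
    have hfind : cs.findIdx? (fun c => PySem.Chars.isdigit c) = none := by
      rw [List.findIdx?_eq_none_iff]
      intro x hx
      obtain ⟨k, hk, rfl⟩ := List.mem_iff_getElem.mp hx
      simpa using hnd k hk (by omega)
    unfold altList
    rw [hfind]
  | succ fuel ih =>
    rw [addRA_outer]
    by_cases h : i < cs.length
    · have hget : cs.getD i ' ' = cs[i] := List.getD_eq_getElem _ _ h
      by_cases hd : PySem.Chars.isdigit cs[i]
      · rw [hget, if_pos hd]
        have hfind : cs.findIdx? (fun c => PySem.Chars.isdigit c) = some i := by
          rw [List.findIdx?_eq_some_iff_getElem]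
          exact ⟨h, hd, fun k hk => by simpa using hnd k (by omega) hk⟩
        unfold altList
        rw [hfind]
        simp only
        rw [addRA_inner_eq cs cs.length i _ (by omega)]
        dsimp only
        have hge : i + 1 ≤ addRB_ext cs cs.length (i + 1) := addRB_ext_ge cs cs.length (i + 1)
        have h1 : addRB_ext cs cs.length (i + 1) - 1 + 1 = addRB_ext cs cs.length (i + 1) := by
          omega
        have hdrop : cs.drop i = cs[i] :: cs.drop (i + 1) := List.drop_eq_getElem_cons h
        have h2 : addRB_ext cs cs.length (i + 1) - i
            = (addRB_ext cs cs.length (i + 1) - (i + 1)) + 1 := by omega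
        rw [h1, hdrop, h2, List.take_succ_cons]
        simp
      · rw [hget, if_neg hd]
        have htake : cs.take i ++ [cs[i]] = cs.take (i + 1) := by
          rw [List.take_add_one, List.getElem?_eq_getElem h]; rfl
        rw [htake]
        exact ih (i + 1) (by omega) (by omega)
          (fun k hk hki => by
            by_cases hk' : k < i
            · exact hnd k hk hk'
            · have hke : k = i := by omega
              subst hke; exact Bool.eq_false_iff.mpr hd)
    · have hi : i = cs.length := by omega
      have hgd : cs.getD i ' ' = ' ' := by
        rw [List.getD_eq_getElem?_getD, List.getElem?_eq_none (by omega)]; rfl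
      rw [hgd]
      rw [if_neg (by simp [PySem.Chars.isdigit])]
      have htake : cs.take i ++ [' '] = cs.take (i + 1) ++ [' '] := by
        rw [List.take_of_length_le (by omega), List.take_of_length_le (by omega)]
      -- i is already past the end: the recursive call keeps returning via this branch
      -- until the fuel runs out, and the zero-fuel case returns cs, as Python's loop exit does.
      clear ih
      have hend : ∀ f j l, cs.length ≤ j → addRA_outer cs a f j l = cs := by
        intro f
        induction f with
        | zero => intro j l _; rw [addRA_outer]
        | succ f ihf =>
          intro j l hj
          rw [addRA_outer]
          have hgd' : cs.getD j ' ' = ' ' := by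
            rw [List.getD_eq_getElem?_getD, List.getElem?_eq_none (by omega)]; rfl
          rw [hgd', if_neg (by simp [PySem.Chars.isdigit])]
          exact ihf (j + 1) _ (by omega)
      rw [hend fuel (i + 1) _ (by omega)]
      have hfind : cs.findIdx? (fun c => PySem.Chars.isdigit c) = none := by
        rw [List.findIdx?_eq_none_iff]
        intro x hx
        obtain ⟨k, hk, rfl⟩ := List.mem_iff_getElem.mp hx
        simpa using hnd k hk (by omega)
      unfold altList
      rw [hfind]

lemma alt_eq (s : String) (a : Int) : add_right_alt s a = String.ofList (altList s.toList a) := by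
  unfold add_right_alt altList
  cases hf : s.toList.findIdx? (fun c => PySem.Chars.isdigit c) with
  | none => simp only [hf]; exact String.ofList_toList.symm
  | some i =>
    simp only [hf]
    rw [PySem.List.slice_to_natCast, PySem.List.slice_natCast, PySem.List.slice_from_natCast]

-- ===== VERDICT (by name: the statement is the Claim_ definition above) =====
theorem add_right_spec : Claim_equal_add_right := by
  intro s a _
  unfold Spec_add_right add_right
  rw [alt_eq]
  have h := addRA_outer_eq s.toList a s.toList.length 0 (by omega) (by omega)
    (fun k hk hk0 => by omega)
  exact congrArg String.ofList (by simpa using h)
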